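-- pv_equiv track=rewrite | github.com/myronsonos/automationkit | examples/example_audio.py | audio_mix_buffers_int32_raw
-- ===== SOURCE A (Python) =====
-- INT_MAX = 2147483647
--
-- INT_MIN = -2147483648
--
-- def audio_mix_buffers_int32_raw(audio_buffers):
--
--     outputlen = None
--     for abuffer in audio_buffers:
--         ablen = len(abuffer)
--         if outputlen is None:
--             outputlen = ablen
--         elif ablen < outputlen:
--             outputlen = ablen
--
--     mbuffer = [0] * outputlen
--
--     for bpos in range(0, outputlen):
--         mword = 0
--         for abuffer in audio_buffers:
--             mword += abuffer[bpos]
--         if mword > INT_MAX: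
--             mword = INT_MAX
--         elif mword < INT_MIN:
--             mword = INT_MIN
--         mbuffer[bpos] = mword
--
--     return mbuffer
-- ===== SOURCE B (Python) =====
-- INT_MAX = 2147483647
--
-- INT_MIN = -2147483648
--
-- def audio_mix_buffers_int32_raw(audio_buffers):
--     outputlen = min(len(abuffer) for abuffer in audio_buffers)
--     acc = [0] * outputlen
--     for abuffer in audio_buffers:
--         acc = [a + v for a, v in zip(acc, abuffer)]
--     return [min(INT_MAX, max(INT_MIN, s)) for s in acc]
-- ===== Notes on version B (the rewrite author's own statement) =====
-- stated objective: alternative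
-- what changed: Buffer-major accumulation: instead of A's position-major nested loop that re-scans all buffers per sample, B folds each buffer once into a running accumulator via zip and clamps in a separate final pass.
import Mathlib
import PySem

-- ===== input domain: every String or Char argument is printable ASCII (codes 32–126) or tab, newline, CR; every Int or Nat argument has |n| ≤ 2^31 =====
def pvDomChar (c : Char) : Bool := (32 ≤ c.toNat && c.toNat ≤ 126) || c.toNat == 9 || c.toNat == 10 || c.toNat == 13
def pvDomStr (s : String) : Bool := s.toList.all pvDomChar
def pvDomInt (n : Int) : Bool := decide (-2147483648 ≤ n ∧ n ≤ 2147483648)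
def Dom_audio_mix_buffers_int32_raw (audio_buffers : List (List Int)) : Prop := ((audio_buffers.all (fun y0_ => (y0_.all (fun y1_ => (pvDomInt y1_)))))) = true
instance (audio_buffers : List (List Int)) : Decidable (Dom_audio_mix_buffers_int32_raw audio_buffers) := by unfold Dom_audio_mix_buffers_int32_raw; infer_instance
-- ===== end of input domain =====

-- B mixes buffer-major (one fold per buffer into a running accumulator via zip, clamping in
-- a separate final pass) instead of A's position-major nested loop; equal cost, different structure.

-- ===== PORT A =====
def audio_mix_buffers_int32_raw (audio_buffers : List (List Int)) : List Int :=
  let outputlen : Option Int := audio_buffers.foldl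
    (fun o ab => match o with
      | none => some (ab.length : Int)
      | some l => if (ab.length : Int) < l then some (ab.length : Int) else some l) none
  match outputlen with
  | none => []  -- Python: [0] * None raises TypeError here; excluded by Pre_
  | some n =>
    (PySem.List.pyRange 0 n 1).map (fun bpos =>
      let mword : Int := audio_buffers.foldl (fun acc ab => acc + PySem.List.pyGetD ab bpos 0) 0
      if mword > 2147483647 then (2147483647 : Int)
      else if mword < -2147483648 then (-2147483648 : Int)
      else mword)

-- ===== PORT B =====
def audio_mix_buffers_int32_raw_alt (audio_buffers : List (List Int)) : List Int :=
  match audio_buffers with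
  | [] => []  -- Python: min of an empty generator raises ValueError here; excluded by Pre_
  | b :: bs =>
    let outputlen : Int := bs.foldl (fun m ab => min m (ab.length : Int)) (b.length : Int)
    let acc := (b :: bs).foldl (fun a ab => List.zipWith (· + ·) a ab)
                 (List.replicate outputlen.toNat (0 : Int))
    acc.map (fun s => min 2147483647 (max (-2147483648) s))

-- ===== PRECONDITION & SPEC =====
-- Pre_ excludes only the empty list, on which the Python A raises TypeError ([0] * None).
def Pre_audio_mix_buffers_int32_raw (audio_buffers : List (List Int)) : Prop := audio_buffers ≠ []
instance (audio_buffers : List (List Int)) : Decidable (Pre_audio_mix_buffers_int32_raw audio_buffers) := by unfold Pre_audio_mix_buffers_int32_raw; infer_instance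
def pvWitness_audio_mix_buffers_int32_raw : List (List Int) := [[1, 2, 3], [4, 5]]
def Spec_audio_mix_buffers_int32_raw (audio_buffers : List (List Int)) (out : List Int) : Prop := out = audio_mix_buffers_int32_raw_alt audio_buffers
instance (audio_buffers : List (List Int)) (out : List Int) : Decidable (Spec_audio_mix_buffers_int32_raw audio_buffers out) := by unfold Spec_audio_mix_buffers_int32_raw; infer_instance

-- ===== CLAIM (what is proved, stated in full; the proofs are below) =====
def Claim_equal_audio_mix_buffers_int32_raw : Prop := ∀ (audio_buffers : List (List Int)), Dom_audio_mix_buffers_int32_raw audio_buffers → Pre_audio_mix_buffers_int32_raw audio_buffers → Spec_audio_mix_buffers_int32_raw audio_buffers (audio_mix_buffers_int32_raw audio_buffers)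

-- ===== LEMMAS AND PROOFS =====

-- A's option-valued minimum fold, once started, is the plain min fold.
theorem foldA_some (bs : List (List Int)) : ∀ l : Int,
    bs.foldl (fun o ab => match o with
      | none => some ((ab.length : Int))
      | some l => if (ab.length : Int) < l then some ((ab.length : Int)) else some l) (some l)
      = some (bs.foldl (fun m ab => min m (ab.length : Int)) l) := by
  induction bs with
  | nil => intro l; rfl
  | cons ab bs ih =>
    intro l
    simp only [List.foldl_cons]
    rw [show (if (ab.length : Int) < l then some ((ab.length : Int)) else some l)
          = some (min l (ab.length : Int)) by
        rw [min_def]; split_ifs <;> first | rfl | (exact congrArg some (by omega))]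
    exact ih _

-- Starting from `none` on a nonempty list, A's fold is the min fold seeded by the head's length.
theorem foldA_none (b : List Int) (bs : List (List Int)) :
    (b :: bs).foldl (fun o ab => match o with
      | none => some ((ab.length : Int))
      | some l => if (ab.length : Int) < l then some ((ab.length : Int)) else some l) none
      = some (bs.foldl (fun m ab => min m (ab.length : Int)) (b.length : Int)) := by
  simp only [List.foldl_cons]
  exact foldA_some bs _

-- The min fold is a lower bound of its seed and of every element's length.
theorem foldMin_le (bs : List (List Int)) : ∀ l : Int,
    bs.foldl (fun m ab => min m (ab.length : Int)) l ≤ l ∧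
    ∀ ab ∈ bs, bs.foldl (fun m ab => min m (ab.length : Int)) l ≤ (ab.length : Int) := by
  induction bs with
  | nil => intro l; exact ⟨le_refl l, by simp⟩
  | cons ab bs ih =>
    intro l
    simp only [List.foldl_cons]
    obtain ⟨h1, h2⟩ := ih (min l (ab.length : Int))
    refine ⟨le_trans h1 (min_le_left _ _), ?_⟩
    intro ab' hmem
    rcases List.mem_cons.mp hmem with rfl | hmem
    · exact le_trans h1 (min_le_right _ _)
    · exact h2 _ hmem

-- The min fold of lengths is nonnegative when its seed is.
theorem foldMin_nonneg (bs : List (List Int)) : ∀ l : Int, 0 ≤ l →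
    0 ≤ bs.foldl (fun m ab => min m (ab.length : Int)) l := by
  induction bs with
  | nil => intro l h; exact h
  | cons ab bs ih =>
    intro l h
    simp only [List.foldl_cons]
    exact ih _ (le_min h (by positivity))

-- Any list equals the map of its entries over range of its length.
theorem map_getD_range (acc : List Int) :
    acc = (List.range acc.length).map (fun i => acc.getD i 0) := by
  apply List.ext_getElem
  · simp
  · intro i h1 h2
    simp [List.getD_eq_getElem?_getD, List.getElem?_eq_getElem (by simpa using h2)]

-- getD of a zero replicate is zero.
theorem getD_replicate_zero (k i : Nat) : (List.replicate k (0 : Int)).getD i 0 = 0 := by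
  simp only [List.getD_eq_getElem?_getD, List.getElem?_replicate]
  split <;> rfl

-- The buffer-major zip fold computes, at each index, the index-wise sum fold.
theorem fold_zip (bufs : List (List Int)) : ∀ acc : List Int,
    (∀ ab ∈ bufs, acc.length ≤ ab.length) →
    bufs.foldl (fun a ab => List.zipWith (· + ·) a ab) acc
      = (List.range acc.length).map
          (fun i => bufs.foldl (fun s ab => s + ab.getD i 0) (acc.getD i 0)) := by
  induction bufs with
  | nil => intro acc _; simpa using map_getD_range acc
  | cons ab bufs ih =>
    intro acc h
    simp only [List.foldl_cons]
    have hlen : (List.zipWith (· + ·) acc ab).length = acc.length := by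
      simp [List.length_zipWith]
      exact h ab (by simp)
    have h' : ∀ ab' ∈ bufs, (List.zipWith (· + ·) acc ab).length ≤ ab'.length := by
      intro ab' hm; rw [hlen]; exact h ab' (by simp [hm])
    rw [ih _ h', hlen]
    apply List.map_congr_left
    intro i hi
    have hi' : i < acc.length := List.mem_range.mp hi
    have hab : i < ab.length := lt_of_lt_of_le hi' (h ab (by simp))
    congr 1
    simp [List.getD_eq_getElem?_getD, List.getElem?_eq_getElem hi',
      List.getElem?_eq_getElem hab, List.getElem?_eq_getElem (hlen ▸ hi')]

-- A's clamp chain equals B's min/max clamp.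
theorem clamp_eq (x : Int) :
    (if x > 2147483647 then (2147483647 : Int)
     else if x < -2147483648 then (-2147483648 : Int) else x)
      = min 2147483647 (max (-2147483648) x) := by
  simp only [min_def, max_def]; split_ifs <;> omega

-- ===== VERDICT (by name: the statement is the Claim_ definition above) =====
theorem audio_mix_buffers_int32_raw_spec : Claim_equal_audio_mix_buffers_int32_raw := by
  intro audio_buffers _ hpre
  unfold Spec_audio_mix_buffers_int32_raw
  match audio_buffers with
  | [] => exact absurd rfl hpre
  | b :: bs =>
    unfold audio_mix_buffers_int32_raw audio_mix_buffers_int32_raw_alt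
    rw [foldA_none b bs]
    dsimp only
    set n : Int := bs.foldl (fun m ab => min m (ab.length : Int)) (b.length : Int) with hn
    obtain ⟨hnb, hnbs⟩ := foldMin_le bs (b.length : Int)
    have hn0 : 0 ≤ n := foldMin_nonneg bs _ (by positivity)
    have hall : ∀ ab ∈ b :: bs, (List.replicate n.toNat (0 : Int)).length ≤ ab.length := by
      intro ab hmem
      rw [List.length_replicate]
      rcases List.mem_cons.mp hmem with rfl | hmem
      · omega
      · have := hnbs ab hmem; omega
    rw [fold_zip (b :: bs) _ hall, List.length_replicate,
        PySem.List.pyRange_one, List.map_map, List.map_map]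
    simp only [sub_zero]
    apply List.map_congr_left
    intro k _
    simp only [Function.comp, zero_add, PySem.List.pyGetD_natCast, getD_replicate_zero,
      List.foldl_cons]
    rw [clamp_eq]
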